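-- pv_equiv track=rewrite | github.com/mirko4001/Advent-of-Code-2023 | day1_b.py | word_to_num_reverse
-- ===== SOURCE A (Python) =====
-- help_dict_reverse = {
--     'eno': '1',
--     'owt': '2',
--     'eerht': '3',
--     'ruof': '4',
--     'evif': '5',
--     'xis': '6',
--     'neves': '7',
--     'thgie': '8',
--     'enin': '9',
--     }
--
-- def word_to_num_reverse(string):
--
--     newString = ""
--
--     for letter in string[::-1]:
--         newString += letter
--         for word, num in help_dict_reverse.items():
--             if word in newString:
--                 newString = newString.replace(word, num)
--
--     return newString
-- ===== SOURCE B (Python) =====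
-- # Forward greedy scan over the reversed string: at each position emit the digit of
-- # the reversed digit-word starting there (skipping its length) or copy the char,
-- # instead of A's rebuild-and-replace of the whole accumulated string per character.
-- _rev_words = [('eno', '1'), ('owt', '2'), ('eerht', '3'), ('ruof', '4'),
--               ('evif', '5'), ('xis', '6'), ('neves', '7'), ('thgie', '8'),
--               ('enin', '9')]
--
-- def word_to_num_reverse(string):
--     s = string[::-1]
--     out = []
--     i, n = 0, len(s)
--     while i < n:
--         for w, d in _rev_words:
--             if s.startswith(w, i):
--                 out.append(d)
--                 i += len(w)
--                 break
--         else: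
--             out.append(s[i])
--             i += 1
--     return ''.join(out)
-- ===== Notes on version B (the rewrite author's own statement) =====
-- stated objective: faster
-- what changed: A rebuilds and rescans the whole accumulated string with substring tests and str.replace after every appended character (quadratic); B reverses once and makes a single forward greedy index scan, emitting the digit of a reversed digit-word matched with startswith at the current position (or copying the char), which is linear.
import Mathlib
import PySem

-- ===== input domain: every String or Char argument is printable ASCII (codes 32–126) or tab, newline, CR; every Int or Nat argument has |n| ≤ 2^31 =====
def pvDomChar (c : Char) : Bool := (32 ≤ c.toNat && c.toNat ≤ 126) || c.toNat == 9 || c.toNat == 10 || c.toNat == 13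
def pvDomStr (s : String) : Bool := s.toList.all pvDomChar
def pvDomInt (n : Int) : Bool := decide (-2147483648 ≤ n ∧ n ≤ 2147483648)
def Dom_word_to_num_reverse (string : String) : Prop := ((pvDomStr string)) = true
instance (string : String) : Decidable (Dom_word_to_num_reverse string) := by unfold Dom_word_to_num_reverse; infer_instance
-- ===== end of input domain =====

-- B replaces A's per-character rescan-and-replace of the whole accumulated string by one
-- forward greedy scan of the reversed string matching the 9 words in place (objective: faster).

-- ===== PORT A =====
-- help_dict_reverse.items(): the dict's insertion-order association list (word, digit-string)
def helpDictReverse : List (List Char × List Char) :=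
  [(['e','n','o'], ['1']), (['o','w','t'], ['2']), (['e','e','r','h','t'], ['3']),
   (['r','u','o','f'], ['4']), (['e','v','i','f'], ['5']), (['x','i','s'], ['6']),
   (['n','e','v','e','s'], ['7']), (['t','h','g','i','e'], ['8']), (['e','n','i','n'], ['9'])]

-- the inner 'for word, num in help_dict_reverse.items(): if word in newString: … .replace(word, num)'
def pyInnerA (ns : List Char) : List Char :=
  helpDictReverse.foldl
    (fun ns wd => if PySem.Chars.isIn wd.1 ns then PySem.Chars.replace ns wd.1 wd.2 else ns) ns

def word_to_num_reverse (string : String) : String :=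
  -- string[::-1]: slice? with step -1 is always 'some' (PySem.List.slice?_none_none_neg_one)
  String.ofList
    (((PySem.List.slice? string.toList none none (-1)).getD []).foldl
      (fun acc c => pyInnerA (acc ++ [c])) [])

-- ===== PORT B =====
def revWords : List (List Char × Char) :=
  [(['e','n','o'], '1'), (['o','w','t'], '2'), (['e','e','r','h','t'], '3'),
   (['r','u','o','f'], '4'), (['e','v','i','f'], '5'), (['x','i','s'], '6'),
   (['n','e','v','e','s'], '7'), (['t','h','g','i','e'], '8'), (['e','n','i','n'], '9')]

-- 'for w, d in _rev_words: if s.startswith(w, i): …': first word starting at the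
-- current position, returned with its digit and length
def tryPrefix : List (List Char × Char) → List Char → Option (Char × Nat)
  | [], _ => none
  | wd :: ws, l => if wd.1 <+: l then some (wd.2, wd.1.length) else tryPrefix ws l

-- the while loop over the reversed string: the remaining input drives the recursion
def fwd : List Char → List Char
  | [] => []
  | c :: t =>
      match tryPrefix revWords (c :: t) with
      | some (d, k) => d :: fwd (t.drop (k - 1))
      | none => c :: fwd t
  termination_by l => l.length
  decreasing_by
  · simp only [List.length_cons, List.length_drop]; omega
  · simp

def word_to_num_reverse_alt (string : String) : String :=
  String.ofList (fwd string.toList.reverse)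

-- ===== PRECONDITION & SPEC =====
def Spec_word_to_num_reverse (string : String) (out : String) : Prop := out = word_to_num_reverse_alt string
instance (string : String) (out : String) : Decidable (Spec_word_to_num_reverse string out) := by unfold Spec_word_to_num_reverse; infer_instance

-- ===== CLAIM (what is proved, stated in full; the proofs are below) =====
def Claim_equal_word_to_num_reverse : Prop := ∀ (string : String), Dom_word_to_num_reverse string → Spec_word_to_num_reverse string (word_to_num_reverse string)

-- ===== LEMMAS AND PROOFS =====

-- proof gadget: collapse a matching word suffix of the accumulated output (the common
-- normal form both algorithms are reduced to)
def trySuffix : List (List Char × Char) → List Char → List Char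
  | [], out => out
  | wd :: rest, out =>
      if wd.1.length ≤ out.length ∧ out.drop (out.length - wd.1.length) = wd.1 then
        out.take (out.length - wd.1.length) ++ [wd.2]
      else trySuffix rest out

-- invariant: the accumulated string contains no reversed digit-word
def NoWord (s : List Char) : Prop := ∀ wd ∈ revWords, ¬ wd.1 <:+: s

-- concrete facts about the word table (checked by kernel evaluation)
theorem words_ne_nil : ∀ wd ∈ revWords, wd.1 ≠ [] := by decide

theorem words_len : ∀ wd ∈ revWords, 3 ≤ wd.1.length := by decide

theorem words_no_digit : ∀ wd ∈ revWords, ∀ wd' ∈ revWords, wd.2 ∉ wd'.1 := by decide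

theorem words_suffix_eq : ∀ wd ∈ revWords, ∀ wd' ∈ revWords, wd.1 <:+ wd'.1 → wd = wd' := by decide

theorem words_infix_eq : ∀ wd ∈ revWords, ∀ wd' ∈ revWords, wd.1 <:+: wd'.1 → wd = wd' := by decide

theorem words_nodup : revWords.Nodup := by decide

theorem helpDict_eq_map : helpDictReverse = revWords.map (fun wd => (wd.1, [wd.2])) := by decide

theorem pyInnerA_eq (ns : List Char) :
    pyInnerA ns = revWords.foldl
      (fun ns wd => if PySem.Chars.isIn wd.1 ns then PySem.Chars.replace ns wd.1 [wd.2] else ns) ns := by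
  simp only [pyInnerA, helpDict_eq_map, List.foldl_map]

theorem foldA_skip (ws : List (List Char × Char)) (t : List Char)
    (h : ∀ wd ∈ ws, ¬ wd.1 <:+: t) :
    ws.foldl (fun ns wd => if PySem.Chars.isIn wd.1 ns then PySem.Chars.replace ns wd.1 [wd.2] else ns) t = t := by
  induction ws with
  | nil => rfl
  | cons wd ws ih =>
      simp only [List.foldl_cons]
      rw [if_neg, ih (fun w hw => h w (List.mem_cons_of_mem _ hw))]
      simp only [PySem.Chars.isIn_iff_infix]
      exact h wd List.mem_cons_self

theorem trySuffix_skip (ws rest : List (List Char × Char)) (t : List Char)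
    (h : ∀ wd ∈ ws, ¬ wd.1 <:+ t) :
    trySuffix (ws ++ rest) t = trySuffix rest t := by
  induction ws with
  | nil => rfl
  | cons wd ws ih =>
      simp only [List.cons_append, trySuffix]
      rw [if_neg, ih (fun w hw => h w (List.mem_cons_of_mem _ hw))]
      rintro ⟨hl, hd⟩
      exact h wd List.mem_cons_self (hd ▸ List.drop_suffix _ _)

theorem trySuffix_id (t : List Char) (h : ∀ wd ∈ revWords, ¬ wd.1 <:+ t) :
    trySuffix revWords t = t := by
  have := trySuffix_skip revWords [] t h
  rw [List.append_nil] at this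
  exact this.trans rfl

theorem infix_snoc {w p : List Char} {c : Char} (h : w <:+: p ++ [c]) :
    w <:+ p ++ [c] ∨ w <:+: p := by
  obtain ⟨u, v, huv⟩ := h
  rcases v.eq_nil_or_concat with rfl | ⟨v', a, rfl⟩
  · left; exact ⟨u, by simpa using huv⟩
  · right
    have h2 : (u ++ w ++ v') ++ [a] = p ++ [c] := by simpa using huv
    have := List.append_inj_left' h2 rfl
    exact ⟨u, v', by simpa using this⟩

theorem mem_of_suffix_snoc {w p : List Char} {c : Char} (h : w <:+ p ++ [c]) (hne : w ≠ []) :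
    c ∈ w := by
  obtain ⟨u, hu⟩ := h
  rcases w.eq_nil_or_concat with rfl | ⟨w', a, rfl⟩
  · exact absurd rfl hne
  · have h2 : (u ++ w') ++ [a] = p ++ [c] := by simpa using hu
    have := List.append_inj_right' h2 rfl
    simp at this
    simp [this]

theorem infix_of_prefix_drop {w s : List Char} {c : Char} {i : Nat}
    (h : w <+: (s ++ [c]).drop i) (hi : i + w.length ≤ s.length) : w <:+: s := by
  have hil : i ≤ s.length := by omega
  rw [List.drop_append_of_le_length hil] at h
  rw [List.prefix_iff_eq_take] at h
  rw [List.take_append_of_le_length (by simp; omega)] at h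
  exact (List.prefix_iff_eq_take.2 h).isInfix.trans (List.drop_suffix i s).isInfix

theorem go_nil (old new acc : List Char) (fuel : Nat) :
    PySem.Chars.replace.go old new fuel [] acc = acc.reverse := by
  cases fuel <;> simp [PySem.Chars.replace.go]

theorem go_cons (old new acc t : List Char) (c : Char) (f : Nat) :
    PySem.Chars.replace.go old new (f+1) (c :: t) acc =
      if old.isPrefixOf (c :: t) then
        PySem.Chars.replace.go old new f ((c :: t).drop old.length) (new.reverse ++ acc)
      else PySem.Chars.replace.go old new f t (c :: acc) := by
  simp [PySem.Chars.replace.go]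

theorem go_suffix (old new : List Char) (hne : old ≠ []) :
    ∀ (pre acc : List Char) (fuel : Nat), pre.length < fuel →
    (∀ i < pre.length, ¬ old <+: (pre ++ old).drop i) →
    PySem.Chars.replace.go old new fuel (pre ++ old) acc = acc.reverse ++ pre ++ new := by
  intro pre
  induction pre with
  | nil =>
      intro acc fuel hf _
      obtain ⟨f, rfl⟩ : ∃ f, fuel = f + 1 := ⟨fuel - 1, by omega⟩
      obtain ⟨c, t, rfl⟩ : ∃ c t, old = c :: t := by
        cases old with
        | nil => exact absurd rfl hne
        | cons c t => exact ⟨c, t, rfl⟩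
      rw [List.nil_append, go_cons, if_pos (List.isPrefixOf_iff_prefix.2 (List.prefix_refl _))]
      rw [List.drop_length, go_nil]
      simp
  | cons p pre ih =>
      intro acc fuel hf hno
      obtain ⟨f, rfl⟩ : ∃ f, fuel = f + 1 := ⟨fuel - 1, by omega⟩
      rw [List.cons_append, go_cons, if_neg, ih (p :: acc) f (by simpa using hf)
        (fun i hi => by simpa using hno (i+1) (by simpa using hi))]
      · simp
      · rw [List.isPrefixOf_iff_prefix]
        simpa using hno 0 (by simp)

theorem replace_suffix (pre old new : List Char) (hne : old ≠ [])
    (hno : ∀ i < pre.length, ¬ old <+: (pre ++ old).drop i) :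
    PySem.Chars.replace (pre ++ old) old new = pre ++ new := by
  rw [PySem.Chars.replace, if_neg (by simp [List.isEmpty_iff, hne])]
  rw [go_suffix old new hne pre [] (pre ++ old).length (by simp; cases old; exact absurd rfl hne; simp) hno]
  simp

theorem step_main (s : List Char) (c : Char) (h : NoWord s) :
    pyInnerA (s ++ [c]) = trySuffix revWords (s ++ [c]) ∧ NoWord (pyInnerA (s ++ [c])) := by
  rw [pyInnerA_eq]
  by_cases hex : ∃ wd ∈ revWords, wd.1 <:+: s ++ [c]
  · obtain ⟨wd, hwd, hinf⟩ := hex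
    have hwne : wd.1 ≠ [] := words_ne_nil wd hwd
    have hsuf : wd.1 <:+ s ++ [c] := by
      rcases infix_snoc hinf with h1 | h1
      · exact h1
      · exact absurd h1 (h wd hwd)
    have hlen : wd.1.length ≤ (s ++ [c]).length := hsuf.length_le
    have hlent : (s ++ [c]).length = s.length + 1 := by simp
    have hwpos : 1 ≤ wd.1.length := by
      cases hw : wd.1 with
      | nil => exact absurd hw hwne
      | cons a b => simp
    have huniq : ∀ wd' ∈ revWords, wd' ≠ wd → ¬ wd'.1 <:+: s ++ [c] := by
      intro wd' hwd' hne hinf'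
      have hsuf' : wd'.1 <:+ s ++ [c] := by
        rcases infix_snoc hinf' with h1 | h1
        · exact h1
        · exact absurd h1 (h wd' hwd')
      rcases List.suffix_or_suffix_of_suffix hsuf' hsuf with h1 | h1
      · exact hne (words_suffix_eq wd' hwd' wd hwd h1)
      · exact hne (words_suffix_eq wd hwd wd' hwd' h1).symm
    obtain ⟨ws1, ws2, hsplit⟩ := List.append_of_mem hwd
    have hnd := hsplit ▸ words_nodup
    rw [List.nodup_append] at hnd
    have hm1 : ∀ x ∈ ws1, x ∈ revWords := by
      intro x hx; rw [hsplit]; exact List.mem_append_left _ hx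
    have hm2 : ∀ x ∈ ws2, x ∈ revWords := by
      intro x hx; rw [hsplit]; exact List.mem_append_right _ (List.mem_cons_of_mem _ hx)
    have hne1 : ∀ x ∈ ws1, x ≠ wd := by
      intro x hx hxe; exact hnd.2.2 x hx wd List.mem_cons_self hxe
    have hne2 : ∀ x ∈ ws2, x ≠ wd := by
      intro x hx hxe; exact (List.nodup_cons.1 hnd.2.1).1 (hxe ▸ hx)
    have hdrop : (s ++ [c]).drop ((s ++ [c]).length - wd.1.length) = wd.1 :=
      (List.suffix_iff_eq_drop.1 hsuf).symm
    have hteq : (s ++ [c]).take ((s ++ [c]).length - wd.1.length) ++ wd.1 = s ++ [c] := by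
      have h0 := List.take_append_drop ((s ++ [c]).length - wd.1.length) (s ++ [c])
      rw [hdrop] at h0
      exact h0
    have hprelen : ((s ++ [c]).take ((s ++ [c]).length - wd.1.length)).length
        = (s ++ [c]).length - wd.1.length := by
      simp only [List.length_take, hlent]; omega
    have hpres : (s ++ [c]).take ((s ++ [c]).length - wd.1.length) <+: s := by
      rw [List.take_append_of_le_length (by omega)]
      exact List.take_prefix _ _
    -- the replaced result
    have hrep : PySem.Chars.replace (s ++ [c]) wd.1 [wd.2]
        = (s ++ [c]).take ((s ++ [c]).length - wd.1.length) ++ [wd.2] := by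
      conv_lhs => rw [← hteq]
      refine replace_suffix _ _ _ hwne ?_
      intro i hi hp
      rw [hteq] at hp
      rw [hprelen] at hi
      exact h wd hwd (infix_of_prefix_drop hp (by omega))
    have hnw2 : ∀ wd' ∈ revWords,
        ¬ wd'.1 <:+: (s ++ [c]).take ((s ++ [c]).length - wd.1.length) ++ [wd.2] := by
      intro wd' hwd' hinf'
      rcases infix_snoc hinf' with h1 | h1
      · exact words_no_digit wd hwd wd' hwd' (mem_of_suffix_snoc h1 (words_ne_nil wd' hwd'))
      · exact h wd' hwd' (h1.trans hpres.isInfix)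
    have hA : revWords.foldl
        (fun ns wd => if PySem.Chars.isIn wd.1 ns then PySem.Chars.replace ns wd.1 [wd.2] else ns)
        (s ++ [c]) = (s ++ [c]).take ((s ++ [c]).length - wd.1.length) ++ [wd.2] := by
      rw [hsplit, List.foldl_append,
        foldA_skip ws1 _ (fun x hx => huniq x (hm1 x hx) (hne1 x hx)), List.foldl_cons,
        if_pos ((PySem.Chars.isIn_iff_infix _ _).2 hinf), hrep,
        foldA_skip ws2 _ (fun x hx => hnw2 x (hm2 x hx))]
    have hB : trySuffix revWords (s ++ [c])
        = (s ++ [c]).take ((s ++ [c]).length - wd.1.length) ++ [wd.2] := by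
      rw [hsplit, trySuffix_skip ws1 _ _ (fun x hx hs =>
        huniq x (hm1 x hx) (hne1 x hx) hs.isInfix)]
      simp only [trySuffix]
      rw [if_pos ⟨hlen, hdrop⟩]
    rw [hA, hB]
    exact ⟨rfl, hnw2⟩
  · push Not at hex
    have hB : trySuffix revWords (s ++ [c]) = s ++ [c] :=
      trySuffix_id _ (fun x hx hs => hex x hx hs.isInfix)
    rw [foldA_skip revWords _ hex, hB]
    exact ⟨rfl, hex⟩

theorem fold_eq (l : List Char) : ∀ (acc : List Char), NoWord acc →
    l.foldl (fun acc c => pyInnerA (acc ++ [c])) acc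
      = l.foldl (fun out c => trySuffix revWords (out ++ [c])) acc := by
  induction l with
  | nil => intro acc _; rfl
  | cons c l ih =>
      intro acc hacc
      simp only [List.foldl_cons]
      obtain ⟨heq, hnw⟩ := step_main acc c hacc
      rw [← heq]
      exact ih _ hnw

-- ===== linking the trySuffix fold to B's forward greedy scan =====

-- 'no match ever uses characters of the already-produced prefix acc'
def Safe (acc r : List Char) : Prop :=
  ∀ wd ∈ revWords, ∀ p : List Char, p <+: r → wd.1 <:+ acc ++ p → wd.1 <:+ p

theorem suffix_of_suffix_length {a b c : List Char} (ha : a <:+ c) (hb : b <:+ c)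
    (hl : a.length ≤ b.length) : a <:+ b := by
  rcases List.suffix_or_suffix_of_suffix ha hb with h | h
  · exact h
  · have := h.length_le
    have : a.length = b.length := by omega
    exact (List.IsSuffix.eq_of_length h this.symm) ▸ List.suffix_refl _
  
theorem safe_snoc_digit (u r : List Char) (d : Char)
    (hd : ∀ wd ∈ revWords, d ∉ wd.1) : Safe (u ++ [d]) r := by
  intro wd hwd p _ hsuf
  have hdp : [d] ++ p <:+ (u ++ [d]) ++ p := ⟨u, by simp⟩
  by_cases hl : wd.1.length ≤ p.length
  · exact suffix_of_suffix_length hsuf (⟨u ++ [d], by simp⟩) hl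
  · have h2 : [d] ++ p <:+ wd.1 :=
      suffix_of_suffix_length hdp hsuf (by simp; omega)
    obtain ⟨z, hz⟩ := h2
    exact absurd (by rw [← hz]; simp : d ∈ wd.1) (hd wd hwd)

theorem safe_cons {acc r : List Char} {c : Char}
    (h : Safe acc (c :: r)) (hno : ∀ wd ∈ revWords, ¬ wd.1 <+: c :: r) :
    Safe (acc ++ [c]) r := by
  intro wd hwd p hp hsuf
  have h1 : wd.1 <:+ c :: p := by
    have := h wd hwd (c :: p) (by simpa using hp) (by simpa using hsuf)
    exact this
  obtain ⟨z, hz⟩ := h1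
  cases z with
  | nil =>
      exfalso
      apply hno wd hwd
      rw [List.nil_append] at hz
      rw [hz]
      simpa using hp
  | cons a z' =>
      exact ⟨z', by injection hz⟩

theorem fold_nomatch (u : List Char) : ∀ (acc : List Char),
    (∀ q : List Char, q ≠ [] → q <+: u → trySuffix revWords (acc ++ q) = acc ++ q) →
    u.foldl (fun out c => trySuffix revWords (out ++ [c])) acc = acc ++ u := by
  induction u with
  | nil => intro acc _; simp
  | cons c u' ih =>
      intro acc hq
      simp only [List.foldl_cons]
      rw [hq [c] (by simp) (by simp)]
      rw [ih (acc ++ [c]) ?_]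
      · simp
      · intro q hqne hqp
        have := hq (c :: q) (by simp) (by simpa using hqp)
        simpa using this

theorem tryPrefix_none {l : List Char} (h : tryPrefix revWords l = none) :
    ∀ wd ∈ revWords, ¬ wd.1 <+: l := by
  have : ∀ ws : List (List Char × Char), tryPrefix ws l = none → ∀ wd ∈ ws, ¬ wd.1 <+: l := by
    intro ws
    induction ws with
    | nil => intro _ wd hwd; simp at hwd
    | cons w ws ih =>
        intro hn wd hwd
        simp only [tryPrefix] at hn
        split_ifs at hn with hpre
        rcases List.mem_cons.1 hwd with rfl | hwd'
        · exact fun hp => hpre hp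
        · exact ih hn wd hwd'
  exact this revWords h

theorem tryPrefix_some {l : List Char} {d : Char} {k : Nat}
    (h : tryPrefix revWords l = some (d, k)) :
    ∃ wd ∈ revWords, wd.1 <+: l ∧ wd.2 = d ∧ wd.1.length = k := by
  have : ∀ ws : List (List Char × Char), tryPrefix ws l = some (d, k) →
      ∃ wd ∈ ws, wd.1 <+: l ∧ wd.2 = d ∧ wd.1.length = k := by
    intro ws
    induction ws with
    | nil => intro hn; simp [tryPrefix] at hn
    | cons w ws ih =>
        intro hn
        simp only [tryPrefix] at hn
        split_ifs at hn with hpre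
        · rw [Option.some.injEq, Prod.mk.injEq] at hn
          exact ⟨w, List.mem_cons_self, hpre, hn.1, hn.2⟩
        · obtain ⟨wd, h1, h2⟩ := ih hn
          exact ⟨wd, List.mem_cons_of_mem _ h1, h2⟩
  exact this revWords h

theorem trySuffix_match (acc : List Char) (wd : List Char × Char) (hwd : wd ∈ revWords)
    (huniq : ∀ wd' ∈ revWords, wd'.1 <:+ acc ++ wd.1 → wd' = wd) :
    trySuffix revWords (acc ++ wd.1) = acc ++ [wd.2] := by
  obtain ⟨ws1, ws2, hsplit⟩ := List.append_of_mem hwd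
  have hnd := hsplit ▸ words_nodup
  rw [List.nodup_append] at hnd
  have hlen : wd.1.length ≤ (acc ++ wd.1).length := by simp
  have hdrop : (acc ++ wd.1).drop ((acc ++ wd.1).length - wd.1.length) = wd.1 := by
    simp [List.length_append]
  have htake : (acc ++ wd.1).take ((acc ++ wd.1).length - wd.1.length) = acc := by
    simp [List.length_append]
  rw [hsplit, trySuffix_skip ws1 _ _ ?_]
  · simp only [trySuffix]
    rw [if_pos ⟨hlen, hdrop⟩, htake]
  · intro x hx hs
    have hxw : x = wd := huniq x (by rw [hsplit]; exact List.mem_append_left _ hx) hs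
    exact hnd.2.2 x hx wd List.mem_cons_self hxw

theorem foldB_eq_fwd : ∀ (n : Nat) (r acc : List Char), r.length ≤ n → Safe acc r →
    r.foldl (fun out c => trySuffix revWords (out ++ [c])) acc = acc ++ fwd r := by
  intro n
  induction n with
  | zero =>
      intro r acc hr _
      cases r with
      | nil => simp [fwd]
      | cons c t => simp at hr
  | succ n ih =>
      intro r acc hr hsafe
      cases r with
      | nil => simp [fwd]
      | cons c t =>
          cases htp : tryPrefix revWords (c :: t) with
          | none =>
              have hfwd : fwd (c :: t) = c :: fwd t := by rw [fwd, htp]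
              simp only [List.foldl_cons]
              have hid : trySuffix revWords (acc ++ [c]) = acc ++ [c] := by
                apply trySuffix_id
                intro wd hwd hs
                have h1 : wd.1 <:+ [c] := hsafe wd hwd [c] (by simp) hs
                have hl1 := h1.length_le
                have hl2 := words_len wd hwd
                simp at hl1
                omega
              rw [hid, ih t (acc ++ [c]) (by simpa using hr)
                (safe_cons hsafe (tryPrefix_none htp)), hfwd]
              simp
          | some dk =>
              obtain ⟨d, k⟩ := dk
              obtain ⟨wd, hwd, hpre, hd2, hlen⟩ := tryPrefix_some htp
              have hk3 : 3 ≤ k := hlen ▸ words_len wd hwd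
              have hfwd : fwd (c :: t) = d :: fwd (t.drop (k - 1)) := by rw [fwd, htp]
              -- split r = wd.1 ++ rest
              obtain ⟨rest, hrest⟩ := hpre
              have hdropk : t.drop (k - 1) = rest := by
                have : (c :: t).drop k = rest := by rw [← hrest, ← hlen]; simp
                rw [← this]
                cases k with
                | zero => omega
                | succ k' => simp
              -- words matching while consuming wd.1 can only be wd itself, at the very end
              have hin : ∀ q : List Char, q <+: wd.1 → ∀ wd' ∈ revWords,
                  wd'.1 <:+ acc ++ q → wd'.1 <:+ q := by
                intro q hq wd' hwd' hs
                exact hsafe wd' hwd' q (hq.trans ⟨rest, hrest⟩) hs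
              -- fold over wd.1 from acc gives acc ++ [wd.2]
              have hfoldw : wd.1.foldl (fun out c => trySuffix revWords (out ++ [c])) acc
                  = acc ++ [wd.2] := by
                obtain ⟨w', a, hwa⟩ := wd.1.eq_nil_or_concat.resolve_left (words_ne_nil wd hwd)
                rw [hwa, List.concat_eq_append, List.foldl_append]
                have hstep1 : w'.foldl (fun out c => trySuffix revWords (out ++ [c])) acc
                    = acc ++ w' := by
                  apply fold_nomatch
                  intro q hqne hqp
                  apply trySuffix_id
                  intro wd' hwd' hs
                  have hq1 : q <+: wd.1 := by
                    rw [hwa, List.concat_eq_append]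
                    exact hqp.trans ⟨[a], rfl⟩
                  have h1 : wd'.1 <:+ q := hin q hq1 wd' hwd' hs
                  have h2 : wd'.1 <:+: wd.1 := h1.isInfix.trans hq1.isInfix
                  have heqw := words_infix_eq wd' hwd' wd hwd h2
                  subst heqw
                  have hl1 := h1.length_le
                  have hql := hqp.length_le
                  have hlw : wd'.1.length = w'.length + 1 := by rw [hwa]; simp
                  omega
                rw [hstep1]
                simp only [List.foldl_cons, List.foldl_nil, List.append_assoc]
                rw [← List.concat_eq_append, ← hwa]
                exact trySuffix_match acc wd hwd (fun wd' hwd' hs =>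
                  words_suffix_eq wd' hwd' wd hwd (hin wd.1 (List.prefix_refl _) wd' hwd' hs))
              calc (c :: t).foldl (fun out c => trySuffix revWords (out ++ [c])) acc
                  = (wd.1 ++ rest).foldl (fun out c => trySuffix revWords (out ++ [c])) acc := by
                    rw [hrest]
                _ = rest.foldl (fun out c => trySuffix revWords (out ++ [c])) (acc ++ [wd.2]) := by
                    rw [List.foldl_append, hfoldw]
                _ = (acc ++ [wd.2]) ++ fwd rest := by
                    apply ih rest (acc ++ [wd.2]) ?_ (safe_snoc_digit acc rest wd.2
                      (words_no_digit wd hwd))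
                    have : (c :: t).length = wd.1.length + rest.length := by
                      rw [← hrest]; simp
                    simp at this hr ⊢
                    omega
                _ = acc ++ fwd (c :: t) := by
                    rw [hfwd, hd2, ← hdropk]
                    simp

-- ===== VERDICT (by name: the statement is the Claim_ definition above) =====
theorem word_to_num_reverse_spec : Claim_equal_word_to_num_reverse := by
  intro string _
  unfold Spec_word_to_num_reverse word_to_num_reverse word_to_num_reverse_alt
  rw [PySem.List.slice?_none_none_neg_one]
  simp only [Option.getD_some]
  rw [fold_eq _ [] (by intro wd hwd h; simp at h; exact words_ne_nil wd hwd h)]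
  rw [foldB_eq_fwd string.toList.reverse.length _ [] le_rfl
    (by intro wd hwd p _ hs; simpa using hs)]
  simp
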